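-- pv_equiv track=rewrite | github.com/talcs/NAAP-440 | scripts/create_feature_conf_matrix_figure.py | fix_alg_names_and_order
-- ===== SOURCE A (Python) =====
-- def fix_alg_names_and_order(algs):
-- 	algs = list(algs)
-- 	lin_reg_indices = [i for (i,a) in enumerate(algs) if 'Linear Regression' in a]
-- 	first_group_end_index = None
-- 	for i, ind in enumerate(lin_reg_indices):
-- 		if first_group_end_index is None and i > 0 and ind - lin_reg_indices[i-1] > 1:
-- 			first_group_end_index = lin_reg_indices[i-1]
-- 		if first_group_end_index is not None:
-- 			alg = algs.pop(ind)
-- 			algs.insert(first_group_end_index + 1, alg)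
-- 			first_group_end_index += 1
-- 	fixed_alg_names = []
-- 	for alg in algs:
-- 		if not alg.startswith('Linear Regression'):
-- 			fixed_alg_names.append(alg)
-- 			continue
-- 		if alg == 'Linear Regression':
-- 			fixed_alg_names.append(alg)
-- 			continue
-- 		if '(' in alg:
-- 			fixed_alg_names.append(alg)
-- 			continue
-- 		parts = alg.split(' ', 3)
-- 		fixed_alg_names.append('Linear Regression (' + parts[2] + ')')
--
-- 	return algs, fixed_alg_names
-- ===== SOURCE B (Python) =====
-- def fix_alg_names_and_order(algs):
-- 	algs = list(algs)
-- 	is_lr = lambda a: 'Linear Regression' in a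
-- 	idxs = [i for (i, a) in enumerate(algs) if is_lr(a)]
-- 	boundary = None
-- 	for k in range(1, len(idxs)):
-- 		if idxs[k] - idxs[k - 1] > 1:
-- 			boundary = idxs[k - 1]
-- 			break
-- 	if boundary is not None:
-- 		prefix = algs[:boundary + 1]
-- 		suffix = algs[boundary + 1:]
-- 		algs = prefix + [a for a in suffix if is_lr(a)] + [a for a in suffix if not is_lr(a)]
--
-- 	def rename(a):
-- 		if not a.startswith('Linear Regression') or a == 'Linear Regression' or '(' in a:
-- 			return a
-- 		return 'Linear Regression (' + a.split(' ', 3)[2] + ')'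
--
-- 	return algs, [rename(a) for a in algs]
-- ===== Notes on version B (the rewrite author's own statement) =====
-- stated objective: simpler
-- what changed: A mutates the list in place, popping each later Linear-Regression entry and re-inserting it after the first contiguous block while shifting an index counter; B finds the first gap in the LR index list once, then builds prefix + stable partition of the suffix (LR entries first, others after) by two filters, and the renaming loop becomes a pure map.
import Mathlib
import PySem

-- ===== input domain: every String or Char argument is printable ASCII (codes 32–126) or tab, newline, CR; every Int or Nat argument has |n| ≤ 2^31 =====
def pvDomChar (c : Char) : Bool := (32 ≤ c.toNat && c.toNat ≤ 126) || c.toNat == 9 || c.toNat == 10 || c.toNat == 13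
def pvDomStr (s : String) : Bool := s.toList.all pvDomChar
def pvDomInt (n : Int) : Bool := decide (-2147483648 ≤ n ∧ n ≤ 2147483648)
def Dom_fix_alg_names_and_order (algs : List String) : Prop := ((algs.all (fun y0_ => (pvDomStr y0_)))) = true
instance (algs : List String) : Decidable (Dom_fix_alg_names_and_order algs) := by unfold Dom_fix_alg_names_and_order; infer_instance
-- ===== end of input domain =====

-- B replaces A's pop/insert mutation loop by: find the first gap in the Linear-Regression index list,
-- then prefix ++ stable partition of the suffix (LR entries first); the renaming loop becomes a map. Objective: simpler.

-- ===== PORT A =====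
-- one iteration of A's `for i, ind in enumerate(lin_reg_indices)` loop; state = (algs, first_group_end_index)
def fixStepA (idxs : List Int) (s : List String × Option Int) (p : Int × Int) : List String × Option Int :=
  let fge : Option Int :=
    if s.2 = none ∧ p.1 > 0 ∧ p.2 - PySem.List.pyGetD idxs (p.1 - 1) 0 > 1 then
      some (PySem.List.pyGetD idxs (p.1 - 1) 0)
    else s.2
  match fge with
  | none => (s.1, none)
  | some f =>
    match PySem.List.pop? s.1 p.2 with
    | none => (s.1, some f)      -- Python IndexError; never reached (indices come from enumerate of the same list)
    | some (alg, rest) => (PySem.List.insert rest (f + 1) alg, some (f + 1))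

-- one iteration of A's renaming loop (the `continue` chain), appending to fixed_alg_names
def fixNameStepA (acc : List String) (alg : String) : List String :=
  if ¬ (PySem.Str.startswith alg "Linear Regression" = true) then acc ++ [alg]
  else if alg == "Linear Regression" then acc ++ [alg]
  else if PySem.Str.isIn "(" alg then acc ++ [alg]
  else
    let parts := (PySem.Str.splitMax? alg " " 3).getD []
    acc ++ ["Linear Regression (" ++ (PySem.List.pyGetD parts 2 "") ++ ")"]

def fix_alg_names_and_order (algs : List String) : List String × List String :=
  let lin_reg_indices : List Int :=
    ((PySem.List.enumerate algs 0).filter (fun p => PySem.Str.isIn "Linear Regression" p.2)).map (fun p => p.1)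
  let algs2 := ((PySem.List.enumerate lin_reg_indices 0).foldl (fixStepA lin_reg_indices) (algs, none)).1
  (algs2, algs2.foldl fixNameStepA [])

-- ===== PORT B =====
def pvIsLR (a : String) : Bool := PySem.Str.isIn "Linear Regression" a

def pvRename (a : String) : String :=
  if !(PySem.Str.startswith a "Linear Regression") || a == "Linear Regression" || PySem.Str.isIn "(" a then a
  else "Linear Regression (" ++ (PySem.List.pyGetD ((PySem.Str.splitMax? a " " 3).getD []) 2 "") ++ ")"

-- B's `for k in range(1, len(idxs)) … break` scan, carrying the previous index
def pvFirstGap (prev : Int) : List Int → Option Int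
  | [] => none
  | x :: t => if x - prev > 1 then some prev else pvFirstGap x t

def fix_alg_names_and_order_alt (algs : List String) : List String × List String :=
  let idxs : List Int := ((PySem.List.enumerate algs 0).filter (fun p => pvIsLR p.2)).map (fun p => p.1)
  let reordered :=
    match idxs with
    | [] => algs
    | x :: t =>
      match pvFirstGap x t with
      | none => algs
      | some b =>
        PySem.List.slice algs none (some (b + 1)) ++
          (PySem.List.slice algs (some (b + 1)) none).filter pvIsLR ++
          (PySem.List.slice algs (some (b + 1)) none).filter (fun a => ! pvIsLR a)
  (reordered, reordered.map pvRename)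

-- ===== PRECONDITION & SPEC =====
-- Pre_ excludes exactly the inputs on which Python A raises IndexError: a list entry that starts with
-- 'Linear Regression', is not that exact string, contains no '(' and has fewer than two spaces
-- (then parts[2] is out of range in the renaming loop; B's Python raises identically there).
def Pre_fix_alg_names_and_order (algs : List String) : Prop :=
  ∀ a ∈ algs, PySem.Str.startswith a "Linear Regression" = true → a ≠ "Linear Regression" →
    PySem.Str.isIn "(" a = false → 2 ≤ PySem.Str.count a " "
instance (algs : List String) : Decidable (Pre_fix_alg_names_and_order algs) := by
  unfold Pre_fix_alg_names_and_order; infer_instance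

def pvWitness_fix_alg_names_and_order : List String :=
  ["Linear Regression", "Linear Regression deg 2", "Tree", "Linear Regression deg 3"]

def Spec_fix_alg_names_and_order (algs : List String) (out : List String × List String) : Prop := out = fix_alg_names_and_order_alt algs
instance (algs : List String) (out : List String × List String) : Decidable (Spec_fix_alg_names_and_order algs out) := by unfold Spec_fix_alg_names_and_order; infer_instance

-- ===== CLAIM (what is proved, stated in full; the proofs are below) =====
def Claim_equal_fix_alg_names_and_order : Prop := ∀ (algs : List String), Dom_fix_alg_names_and_order algs → Pre_fix_alg_names_and_order algs → Spec_fix_alg_names_and_order algs (fix_alg_names_and_order algs)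

-- ===== LEMMAS AND PROOFS =====

def lrPosFrom (n : Nat) : List String → List Int
  | [] => []
  | a :: t => if pvIsLR a then ((n : Int)) :: lrPosFrom (n+1) t else lrPosFrom (n+1) t

lemma enum_lrPos (L : List String) : ∀ n : Nat,
    ((PySem.List.enumerate L (n : Int)).filter (fun p => pvIsLR p.2)).map (fun p => p.1)
      = lrPosFrom n L := by
  induction L with
  | nil => intro n; simp [lrPosFrom, PySem.List.enumerate_nil]
  | cons a t ih =>
    intro n
    rw [PySem.List.enumerate_cons]
    have e1 : ((n:Int) + 1) = ((n+1 : Nat) : Int) := by push_cast; ring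
    rw [e1]
    by_cases h : pvIsLR a = true
    · rw [List.filter_cons_of_pos (by simpa using h)]
      simp only [List.map_cons]
      rw [ih (n+1)]
      simp [lrPosFrom, h]
    · rw [List.filter_cons_of_neg (by simpa using h)]
      rw [ih (n+1)]
      simp [lrPosFrom, h]

lemma lrPosFrom_append (X Y : List String) : ∀ n : Nat,
    lrPosFrom n (X ++ Y) = lrPosFrom n X ++ lrPosFrom (n + X.length) Y := by
  induction X with
  | nil => intro n; simp [lrPosFrom]
  | cons a t ih =>
    intro n
    by_cases h : pvIsLR a = true <;>
      simp [lrPosFrom, h, ih (n+1)] <;> ring_nf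

lemma lrPosFrom_bounds (L : List String) : ∀ n : Nat, ∀ m ∈ lrPosFrom n L,
    (n : Int) ≤ m ∧ m < (n : Int) + L.length := by
  induction L with
  | nil => intro n m hm; simp [lrPosFrom] at hm
  | cons a t ih =>
    intro n m hm
    by_cases h : pvIsLR a = true <;> simp [lrPosFrom, h] at hm
    · rcases hm with rfl | hm
      · refine ⟨le_refl _, ?_⟩
        simp only [List.length_cons]; push_cast; omega
      · have := ih (n+1) m hm
        simp only [List.length_cons]; push_cast at this ⊢; omega
    · have := ih (n+1) m hm
      simp only [List.length_cons]; push_cast at this ⊢; omega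

lemma lrPosFrom_nil_of_none (R : List String) : ∀ n : Nat,
    (∀ x ∈ R, pvIsLR x = false) → lrPosFrom n R = [] := by
  induction R with
  | nil => intro n _; rfl
  | cons a t ih =>
    intro n h
    have ha := h a (by simp)
    simp [lrPosFrom, ha]
    exact ih (n+1) (fun x hx => h x (by simp [hx]))

lemma filter_none_of_lrPosFrom_nil (R : List String) : ∀ n : Nat,
    lrPosFrom n R = [] → ∀ x ∈ R, pvIsLR x = false := by
  induction R with
  | nil => simp
  | cons a t ih =>
    intro n h x hx
    by_cases ha : pvIsLR a = true
    · simp [lrPosFrom, ha] at h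
    · simp [lrPosFrom, ha] at h
      rcases List.mem_cons.mp hx with rfl | hx
      · simpa using ha
      · exact ih (n+1) h x hx

lemma lrPosFrom_cons_elim (R : List String) : ∀ (n : Nat) (j : Int) (rest : List Int),
    lrPosFrom n R = j :: rest →
    ∃ R₁ a R₂, R = R₁ ++ a :: R₂ ∧ (∀ x ∈ R₁, pvIsLR x = false) ∧ pvIsLR a = true ∧
      j = (n : Int) + R₁.length ∧ rest = lrPosFrom (n + R₁.length + 1) R₂ := by
  induction R with
  | nil => intro n j rest h; simp [lrPosFrom] at h
  | cons a t ih =>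
    intro n j rest h
    by_cases ha : pvIsLR a = true
    · simp [lrPosFrom, ha] at h
      exact ⟨[], a, t, by simp, by simp, ha, by simp [h.1], by simpa using h.2.symm⟩
    · simp [lrPosFrom, ha] at h
      obtain ⟨R₁, b, R₂, hR, h1, h2, h3, h4⟩ := ih (n+1) j rest h
      refine ⟨a :: R₁, b, R₂, by simp [hR], ?_, h2, ?_, ?_⟩
      · intro x hx; rcases List.mem_cons.mp hx with rfl | hx
        · simpa using ha
        · exact h1 x hx
      · rw [h3]; simp only [List.length_cons]; push_cast; ring
      · rw [h4]; congr 1; simp only [List.length_cons]; omega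

lemma fixStepA_some (idxs : List Int) (C : List String) (f : Int) (p : Int × Int) :
    fixStepA idxs (C, some f) p
      = match PySem.List.pop? C p.2 with
        | none => (C, some f)
        | some (alg, rest) => (PySem.List.insert rest (f + 1) alg, some (f + 1)) := by
  simp [fixStepA]

lemma get_append_len {α : Type} (X Y : List α) (a : α) : (X ++ a :: Y)[X.length]'(by simp) = a := by
  induction X with
  | nil => rfl
  | cons x t ih => simpa using ih

lemma erase_append_len {α : Type} (X Y : List α) (a : α) : (X ++ a :: Y).eraseIdx X.length = X ++ Y := by
  induction X with
  | nil => rfl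
  | cons x t ih => simpa [List.eraseIdx] using ih

lemma postgap (idxs : List Int) :
    ∀ (pairs : List (Int × Int)) (R P M : List String) (f : Int),
    f + 1 = ((P.length + M.length : Nat) : Int) →
    pairs.map (fun p => p.2) = lrPosFrom (P.length + M.length) R →
    pairs.foldl (fixStepA idxs) (P ++ M ++ R, some f)
      = (P ++ M ++ R.filter pvIsLR ++ R.filter (fun a => ! pvIsLR a),
         some (f + (R.filter pvIsLR).length)) := by
  intro pairs
  induction pairs with
  | nil =>
    intro R P M f hf hmap
    have hall : ∀ x ∈ R, pvIsLR x = false :=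
      filter_none_of_lrPosFrom_nil R _ (by simpa using hmap.symm)
    have h1 : R.filter pvIsLR = [] := by
      rw [List.filter_eq_nil_iff]; intro x hx; simp [hall x hx]
    have h2 : R.filter (fun a => ! pvIsLR a) = R := by
      rw [List.filter_eq_self]; intro x hx; simp [hall x hx]
    simp [h1, h2]
  | cons p ps ih =>
    intro R P M f hf hmap
    simp only [List.map_cons] at hmap
    obtain ⟨R₁, a, R₂, hR, hR₁, ha, hj, hrest⟩ := lrPosFrom_cons_elim R _ _ _ hmap.symm
    have hxs : P ++ M ++ R = (P ++ M ++ R₁) ++ a :: R₂ := by simp [hR]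
    have h2 : p.2 = (((P ++ M ++ R₁).length : Nat) : Int) := by
      rw [hj]; simp; push_cast; ring
    have hpop : PySem.List.pop? (P ++ M ++ R) p.2 = some (a, (P ++ M) ++ (R₁ ++ R₂)) := by
      rw [hxs, h2, PySem.List.pop?_natCast _ _ (by simp)]
      rw [get_append_len, erase_append_len]
      simp
    have hins : PySem.List.insert ((P ++ M) ++ (R₁ ++ R₂)) (f + 1) a
        = (P ++ (M ++ [a])) ++ (R₁ ++ R₂) := by
      have hfl : f + 1 = (((P ++ M).length : Nat) : Int) := by rw [hf]; simp
      rw [hfl, PySem.List.insert_natCast _ _ _ (by simp)]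
      rw [List.take_left, List.drop_left]
      simp
    have hR₁lr : R₁.filter pvIsLR = [] := by
      rw [List.filter_eq_nil_iff]; intro x hx; simp [hR₁ x hx]
    have hR₁n : R₁.filter (fun a => ! pvIsLR a) = R₁ := by
      rw [List.filter_eq_self]; intro x hx; simp [hR₁ x hx]
    rw [List.foldl_cons, fixStepA_some, hpop]
    simp only []
    rw [hins]
    rw [ih (R₁ ++ R₂) P (M ++ [a]) (f + 1)
      (by simp only [List.length_append, List.length_cons, List.length_nil] at hf ⊢; push_cast at hf ⊢; omega)
      (by rw [hrest]
          have : P.length + (M ++ [a]).length = P.length + M.length + 1 := by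
            simp only [List.length_append, List.length_cons, List.length_nil]; omega
          rw [this, lrPosFrom_append]
          rw [lrPosFrom_nil_of_none R₁ _ hR₁]
          simp only [List.nil_append]
          congr 1
          omega)]
    simp only [Prod.mk.injEq]
    refine ⟨?_, ?_⟩
    · simp [hR, List.filter_append, hR₁lr, hR₁n, List.filter_cons, ha]
    · simp only [hR, List.filter_append, hR₁lr, List.filter_cons_of_pos ha, List.nil_append,
        List.length_cons]
      push_cast
      ring

lemma fixStepA_none_nogap (idxs : List Int) (C : List String) (p : Int × Int)
    (h : ¬(0 < p.1 ∧ 1 < p.2 - PySem.List.pyGetD idxs (p.1 - 1) 0)) :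
    fixStepA idxs (C, none) p = (C, none) := by
  simp [fixStepA, h]

lemma fixStepA_none_gap (idxs : List Int) (C : List String) (p : Int × Int)
    (h1 : 0 < p.1) (h2 : 1 < p.2 - PySem.List.pyGetD idxs (p.1 - 1) 0) :
    fixStepA idxs (C, none) p = fixStepA idxs (C, some (PySem.List.pyGetD idxs (p.1 - 1) 0)) p := by
  simp [fixStepA, h1, h2]

lemma pregap (L : List String) (idxs : List Int) (hidxs : idxs = lrPosFrom 0 L) :
    ∀ (t : List Int) (k : Nat) (prev : Int),
    1 ≤ k →
    idxs.drop (k - 1) = prev :: t →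
    (PySem.List.enumerate t (k : Int)).foldl (fixStepA idxs) (L, none)
      = match pvFirstGap prev t with
        | none => (L, none)
        | some b =>
            (L.take (b + 1).toNat ++ (L.drop (b + 1).toNat).filter pvIsLR
               ++ (L.drop (b + 1).toNat).filter (fun a => ! pvIsLR a),
             some (b + ((L.drop (b + 1).toNat).filter pvIsLR).length)) := by
  intro t
  induction t with
  | nil =>
    intro k prev hk hdrop
    simp [PySem.List.enumerate_nil, pvFirstGap]
  | cons j t' ih =>
    intro k prev hk hdrop
    have hklen : k - 1 < idxs.length := by
      by_contra hcon
      have : idxs.drop (k - 1) = [] := List.drop_eq_nil_of_le (by omega)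
      simp [this] at hdrop
    have hget? : idxs[k - 1]? = some prev := by
      have h0 : (idxs.drop (k - 1))[0]? = some prev := by rw [hdrop]; rfl
      rw [List.getElem?_drop] at h0
      simpa using h0
    have hgetD : PySem.List.pyGetD idxs ((k : Int) - 1) 0 = prev := by
      have hcast : (k : Int) - 1 = ((k - 1 : Nat) : Int) := by push_cast [Nat.cast_sub hk]; ring
      rw [hcast, PySem.List.pyGetD_natCast]
      simp [List.getD_eq_getElem?_getD, hget?]
    have hdropk : idxs.drop k = j :: t' := by
      have h' : (idxs.drop (k - 1)).drop 1 = j :: t' := by rw [hdrop]; simp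
      rw [List.drop_drop] at h'
      first
      | rwa [show 1 + (k - 1) = k by omega] at h'
      | rwa [show (k - 1) + 1 = k by omega] at h'
    rw [PySem.List.enumerate_cons, List.foldl_cons]
    by_cases hgap : 1 < j - prev
    · -- the first gap: switch to the post-gap invariant
      have hprevmem : prev ∈ idxs := by
        have : prev ∈ idxs.drop (k - 1) := by rw [hdrop]; simp
        exact List.mem_of_mem_drop this
      have hb := lrPosFrom_bounds L 0 prev (by rwa [hidxs] at hprevmem)
      have hprev0 : 0 ≤ prev := by simpa using hb.1
      set bn : Nat := prev.toNat with hbn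
      have hprevbn : prev = (bn : Int) := by simp [hbn, Int.toNat_of_nonneg hprev0]
      have hbnlt : bn < L.length := by
        have := hb.2; simp at this; omega
      have htake : (L.take (bn + 1)).length = bn + 1 := by
        simp [List.length_take]; omega
      have hsplit : idxs = lrPosFrom 0 (L.take (bn + 1)) ++ lrPosFrom (bn + 1) (L.drop (bn + 1)) := by
        rw [hidxs]
        have := lrPosFrom_append (L.take (bn + 1)) (L.drop (bn + 1)) 0
        rw [List.take_append_drop] at this
        rw [this, htake]
        norm_num
    -- length of the first-block prefix is exactly k
      set A' := lrPosFrom 0 (L.take (bn + 1)) with hA'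
      set B' := lrPosFrom (bn + 1) (L.drop (bn + 1)) with hB'
      have hAlt : ∀ m ∈ A', m < (bn : Int) + 1 := by
        intro m hm
        have := (lrPosFrom_bounds (L.take (bn + 1)) 0 m hm).2
        rw [htake] at this; push_cast at this ⊢; omega
      have hBge : ∀ m ∈ B', (bn : Int) + 1 ≤ m := by
        intro m hm
        have := (lrPosFrom_bounds (L.drop (bn + 1)) (bn + 1) m hm).1
        push_cast at this ⊢; omega
      have hdlen : A'.length = k := by
        rcases Nat.lt_trichotomy A'.length k with hlt | heq | hgt
        · exfalso
          have hdropA : idxs.drop A'.length = B' := by rw [hsplit]; exact List.drop_left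
          have : idxs.drop (k - 1) = B'.drop ((k - 1) - A'.length) := by
            rw [← hdropA, List.drop_drop]
            congr 1; omega
          have hmem : prev ∈ B' := by
            have : prev ∈ B'.drop ((k - 1) - A'.length) := by
              rw [← this, hdrop]; simp
            exact List.mem_of_mem_drop this
          have := hBge prev hmem
          omega
        · exact heq
        · exfalso
          have hjk : idxs[k]? = some j := by
            have h0 : (idxs.drop k)[0]? = some j := by rw [hdropk]; rfl
            rw [List.getElem?_drop] at h0
            simpa using h0
          have hAtake : A' = idxs.take A'.length := by rw [hsplit, List.take_left]
          have hjmem : j ∈ A' := by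
            rw [hAtake]
            have : (idxs.take A'.length)[k]? = some j := by
              rw [List.getElem?_take_of_lt hgt]
              exact hjk
            exact List.mem_of_getElem? this
          have := hAlt j hjmem
          omega
      have hBt : B' = j :: t' := by
        have : idxs.drop A'.length = B' := by rw [hsplit]; exact List.drop_left
        rw [hdlen, hdropk] at this
        exact this.symm
      -- switch the state to `some prev` and run postgap
      have hsw : fixStepA idxs (L, none) ((k : Int), j)
          = fixStepA idxs (L, some prev) ((k : Int), j) := by
        have h1 : (0:Int) < (k : Int) := by push_cast; omega
        have := fixStepA_none_gap idxs L ((k : Int), j) (by simpa using h1) (by simpa [hgetD] using hgap)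
        rw [this, hgetD]
      rw [hsw, ← List.foldl_cons]
      have hpost := postgap idxs (((k : Int), j) :: PySem.List.enumerate t' ((k : Int) + 1))
        (L.drop (bn + 1)) (L.take (bn + 1)) [] prev
        (by rw [htake, hprevbn]; push_cast; simp)
        (by rw [htake]
            simp only [List.length_nil, Nat.add_zero, List.map_cons, PySem.List.map_snd_enumerate]
            rw [← hB', hBt])
      have eL : L.take (bn + 1) ++ [] ++ L.drop (bn + 1) = L := by
        simp only [List.append_nil, List.nil_append, List.take_append_drop]
      rw [eL] at hpost
      have hfg : pvFirstGap prev (j :: t') = some prev := by simp [pvFirstGap, hgap]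
      rw [hfg, hpost]
      have htn : (prev + 1).toNat = bn + 1 := by omega
      simp [htn]
    · -- no gap yet: the state is unchanged
      have hstep : fixStepA idxs (L, none) ((k : Int), j) = (L, none) := by
        apply fixStepA_none_nogap
        simp only [hgetD]
        push_cast
        omega
      rw [hstep]
      have hcast : ((k : Int) + 1) = ((k + 1 : Nat) : Int) := by push_cast; ring
      rw [hcast]
      have hdrop' : idxs.drop ((k + 1) - 1) = j :: t' := by
        simpa using hdropk
      rw [ih (k + 1) j (by omega) hdrop']
      have : pvFirstGap prev (j :: t') = pvFirstGap j t' := by simp [pvFirstGap, hgap]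
      rw [this]

lemma pvFirstGap_mem (t : List Int) : ∀ (prev b : Int), pvFirstGap prev t = some b → b = prev ∨ b ∈ t := by
  induction t with
  | nil => intro prev b h; simp [pvFirstGap] at h
  | cons x t ih =>
    intro prev b h
    by_cases hx : 1 < x - prev
    · simp [pvFirstGap, hx] at h; left; omega
    · simp [pvFirstGap, hx] at h
      rcases ih x b h with rfl | hb
      · right; simp
      · right; simp [hb]

lemma rename_step (acc : List String) (a : String) : fixNameStepA acc a = acc ++ [pvRename a] := by
  by_cases h1 : PySem.Str.startswith a "Linear Regression" = true
  · by_cases h2 : a = "Linear Regression"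
    · simp only [fixNameStepA, pvRename, h1, h2]; simp
    · have h2' : (a == "Linear Regression") = false := by simp [h2]
      by_cases h3 : PySem.Str.isIn "(" a = true
      · simp only [fixNameStepA, pvRename, h1, h2', h3]; simp [h2]
      · have h3' : PySem.Str.isIn "(" a = false := by simpa using h3
        simp only [fixNameStepA, pvRename, h1, h2', h3']; simp [h2]
  · have h1' : PySem.Str.startswith a "Linear Regression" = false := by simpa using h1
    simp only [fixNameStepA, pvRename, h1']; simp

lemma rename_fold (xs : List String) : ∀ acc : List String,
    xs.foldl fixNameStepA acc = acc ++ xs.map pvRename := by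
  induction xs with
  | nil => intro acc; simp
  | cons a t ih => intro acc; simp [rename_step, ih]

lemma main_eq (algs : List String) : fix_alg_names_and_order algs = fix_alg_names_and_order_alt algs := by
  simp only [fix_alg_names_and_order, fix_alg_names_and_order_alt]
  have hidxB : ((PySem.List.enumerate algs 0).filter (fun p => pvIsLR p.2)).map (fun p => p.1)
      = lrPosFrom 0 algs := by
    simpa using enum_lrPos algs 0
  have hidxA : ((PySem.List.enumerate algs 0).filter
      (fun p => PySem.Str.isIn "Linear Regression" p.2)).map (fun p => p.1) = lrPosFrom 0 algs := by
    have := hidxB; simp only [pvIsLR] at this; exact this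
  rw [hidxA, hidxB]
  cases hL : lrPosFrom 0 algs with
  | nil =>
    simp [PySem.List.enumerate_nil, rename_fold]
  | cons x t =>
    have h0 : PySem.List.enumerate (x :: t) 0 = (0, x) :: PySem.List.enumerate t 1 := by
      rw [PySem.List.enumerate_cons]; norm_num
    rw [h0, List.foldl_cons]
    have hstep0 : fixStepA (x :: t) (algs, none) (0, x) = (algs, none) := by
      apply fixStepA_none_nogap
      simp
    rw [hstep0]
    have h1 : (1 : Int) = ((1 : Nat) : Int) := by norm_num
    rw [h1, pregap algs (x :: t) hL.symm t 1 x (le_refl 1) (by simp)]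
    cases hg : pvFirstGap x t with
    | none => simp [hg, rename_fold]
    | some b =>
      have hb0 : 0 ≤ b := by
        have hmem : b ∈ lrPosFrom 0 algs := by
          rw [hL]
          rcases pvFirstGap_mem t x b hg with rfl | hbt
          · simp
          · simp [hbt]
        simpa using (lrPosFrom_bounds algs 0 b hmem).1
      have hsl1 : PySem.List.slice algs none (some (b + 1)) = algs.take (b + 1).toNat :=
        PySem.List.slice_to algs (by omega)
      have hsl2 : PySem.List.slice algs (some (b + 1)) none = algs.drop (b + 1).toNat :=
        PySem.List.slice_from algs (by omega)
      simp [hg, hsl1, hsl2, rename_fold]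

-- ===== VERDICT (by name: the statement is the Claim_ definition above) =====
theorem fix_alg_names_and_order_spec : Claim_equal_fix_alg_names_and_order := by
  intro algs _ _
  show _ = _
  exact main_eq algs
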